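-- pv_equiv track=rewrite | github.com/Uthaeus/codewars_python | 6kyu/loneliest.py | loneliest
-- ===== SOURCE A (Python) =====
-- def loneliest(strng):
--     new_str = strng.strip()
--     longest = 0
--     obj = {}
--     pre = 0
--     post = 0
--     current_char = ''
--     x = 0
--     result = []
--
--     while x < len(new_str):
--         if x == 0:
--             current_char = new_str[x]
--         elif new_str[x] == ' ':
--             pre += 1
--         elif new_str[x] != ' ':
--             if pre + post > longest:
--                 longest = pre + post
--             obj[current_char] = pre + post
--             current_char = new_str[x]
--             post = pre
--             pre = 0
--         obj[current_char] = pre + post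
--         if pre + post > longest:
--             longest = pre + post
--         x += 1
--     print (obj)
--
--     for i in obj:
--         if obj[i] == longest:
--             result.append(i)
--
--     return result
-- ===== SOURCE B (Python) =====
-- def loneliest(strng):
--     # tokenize: (char, number-of-spaces-before) for each non-space char of the stripped string
--     pairs = []
--     before = 0
--     for ch in strng.strip():
--         if ch == ' ':
--             before += 1
--         else:
--             pairs.append((ch, before))
--             before = 0
--     obj = {}
--     longest = 0
--     afters = [b for _, b in pairs[1:]] + [0]
--     for (ch, b), after in zip(pairs, afters):
--         val = b + after
--         obj[ch] = val
--         if val > longest: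
--             longest = val
--     print(obj)
--     return [c for c in obj if obj[c] == longest]
-- ===== Notes on version B (the rewrite author's own statement) =====
-- stated objective: alternative
-- what changed: Replaces A's single index-driven while-loop state machine (pre/post running counters, current_char hand-off, and a dict write plus longest check on every character) by a two-pass tokenize-then-combine: first pass collects (char, spaces-before) pairs, second pass zips each token with the next token's space count to get its value, so dict writes and max updates happen once per non-space character instead of once per character.
import Mathlib
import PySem

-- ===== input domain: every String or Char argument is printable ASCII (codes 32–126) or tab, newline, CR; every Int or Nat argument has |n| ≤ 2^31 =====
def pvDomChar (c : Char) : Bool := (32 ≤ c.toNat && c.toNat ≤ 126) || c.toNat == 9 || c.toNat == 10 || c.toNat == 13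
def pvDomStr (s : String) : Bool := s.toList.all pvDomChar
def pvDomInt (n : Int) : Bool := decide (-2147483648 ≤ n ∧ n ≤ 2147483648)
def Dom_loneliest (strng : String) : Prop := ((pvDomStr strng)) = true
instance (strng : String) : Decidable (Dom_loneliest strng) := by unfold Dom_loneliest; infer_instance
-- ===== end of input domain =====

-- B replaces A's index-driven pre/post state machine by tokenize-then-combine (pairs of
-- (char, spaces-before) zipped with the following pair's count); equal RETURN value is proved,
-- Python-side both implementations also perform the same print(obj) side effect (not modeled here).

-- ===== PORT A =====
-- state: (longest, obj, pre, post, current_char)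
abbrev LonSt : Type := Int × PySem.Dict String Int × Int × Int × String

-- one iteration of A's while-loop body, for the char at index x
def lonStep (st : LonSt) (p : Char × Nat) : LonSt :=
  match st, p with
  | (longest, obj, pre, post, cur), (c, x) =>
    let st1 : LonSt :=
      if x == 0 then (longest, obj, pre, post, String.ofList [c])
      else if c == ' ' then (longest, obj, pre + 1, post, cur)
      else if c != ' ' then
        let longest1 := if pre + post > longest then pre + post else longest
        let obj1 := obj.insert cur (pre + post)
        (longest1, obj1, 0, pre, String.ofList [c])
      else (longest, obj, pre, post, cur)
    match st1 with
    | (longest2, obj2, pre2, post2, cur2) =>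
      let obj3 := obj2.insert cur2 (pre2 + post2)
      let longest3 := if pre2 + post2 > longest2 then pre2 + post2 else longest2
      (longest3, obj3, pre2, post2, cur2)

def loneliest (strng : String) : List String :=
  let cs := (PySem.Str.strip strng).toList
  let fin := cs.zipIdx.foldl lonStep ((0 : Int), PySem.Dict.empty, (0 : Int), (0 : Int), "")
  -- for i in obj: … obj[i] …  (i is a key of obj, so the lookup is exact via getD)
  fin.2.1.keys.foldl (fun result i => if fin.2.1.getD i 0 == fin.1 then result ++ [i] else result) []

-- ===== PORT B =====
def loneliest_alt (strng : String) : List String :=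
  let cs := (PySem.Str.strip strng).toList
  let tk := cs.foldl
    (fun (acc : List (String × Int) × Int) c =>
      if c == ' ' then (acc.1, acc.2 + 1) else (acc.1 ++ [(String.ofList [c], acc.2)], (0 : Int)))
    ([], (0 : Int))
  let pairs := tk.1
  let afters := (PySem.List.slice pairs (some 1) none).map (fun q => q.2) ++ [(0 : Int)]
  let fin := (List.zip pairs afters).foldl
    (fun (acc : PySem.Dict String Int × Int) pa =>
      let val := pa.1.2 + pa.2
      (acc.1.insert pa.1.1 val, if val > acc.2 then val else acc.2))
    (PySem.Dict.empty, (0 : Int))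
  fin.1.keys.filter (fun c => fin.1.getD c 0 == fin.2)

-- ===== PRECONDITION & SPEC =====
def Spec_loneliest (strng : String) (out : List String) : Prop := out = loneliest_alt strng
instance (strng : String) (out : List String) : Decidable (Spec_loneliest strng out) := by unfold Spec_loneliest; infer_instance

-- ===== CLAIM (what is proved, stated in full; the proofs are below) =====
def Claim_equal_loneliest : Prop := ∀ (strng : String), Dom_loneliest strng → Spec_loneliest strng (loneliest strng)

-- ===== LEMMAS AND PROOFS =====

-- A's loop body for every index x ≥ 1 (the x == 0 branch never fires)
def pvStep (st : LonSt) (c : Char) : LonSt := lonStep st (c, 1)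

-- tokens of a char list: (char as 1-string, number of spaces before it), starting with b pending spaces
def pvTok : List Char → Int → List (String × Int)
  | [], _ => []
  | c :: r, b => if c = ' ' then pvTok r (b + 1) else (String.ofList [c], b) :: pvTok r 0

-- pending space count left after consuming the list
def pvTrail : List Char → Int → Int
  | [], b => b
  | c :: r, b => if c = ' ' then pvTrail r (b + 1) else pvTrail r 0

-- the "before" count of the next token (t if none)
def pvNext (ts : List (String × Int)) (t : Int) : Int :=
  match ts with
  | [] => t
  | q :: _ => q.2

-- combined values: each token's before + the following token's before (t for the last)
def pvVals : List (String × Int) → Int → List (String × Int)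
  | [], _ => []
  | [(c, b)], t => [(c, b + t)]
  | (c, b) :: (d, b') :: r, t => (c, b + b') :: pvVals ((d, b') :: r) t

-- fold a value list into a dict
def pvIns (d : PySem.Dict String Int) (l : List (String × Int)) : PySem.Dict String Int :=
  l.foldl (fun o p => o.insert p.1 p.2) d

lemma pvIfMax (m v : Int) : (if v > m then v else m) = max m v := by
  split_ifs with h
  · exact (max_eq_right h.le).symm
  · exact (max_eq_left (le_of_not_gt h)).symm

lemma pvVals_cons (c : String) (b : Int) (ts : List (String × Int)) (t : Int) :
    pvVals ((c, b) :: ts) t = (c, b + pvNext ts t) :: pvVals ts t := by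
  cases ts with
  | nil => rfl
  | cons q r => rcases q with ⟨d, b'⟩; rfl

lemma pvIns_cons (d : PySem.Dict String Int) (p : String × Int) (l : List (String × Int)) :
    pvIns d (p :: l) = pvIns (d.insert p.1 p.2) l := rfl

lemma pvIns_insert_absorb (X : PySem.Dict String Int) (k : String) (a v : Int) (l : List (String × Int)) :
    pvIns (X.insert k a) ((k, v) :: l) = pvIns X ((k, v) :: l) := by
  simp [pvIns, List.foldl_cons, PySem.Dict.insert_insert_self]

lemma pvTok_next_ge : ∀ (r : List Char) (b : Int), b ≤ pvNext (pvTok r b) (pvTrail r b) := by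
  intro r
  induction r with
  | nil => intro b; simp [pvTok, pvTrail, pvNext]
  | cons c r ih =>
    intro b
    by_cases hc : c = ' '
    · simp only [pvTok, pvTrail, if_pos hc]
      exact le_trans (by omega) (ih (b + 1))
    · simp [pvTok, if_neg hc, pvNext]

lemma pvTrail_zero : ∀ (r : List Char) (d : Char), r.getLast? = some d → d ≠ ' ' → ∀ b, pvTrail r b = 0 := by
  intro r
  induction r with
  | nil => intro d hd; simp at hd
  | cons c r ih =>
    intro d hd hne b
    cases r with
    | nil =>
      simp at hd
      subst hd
      simp [pvTrail, if_neg hne]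
    | cons e r' =>
      rw [List.getLast?_cons_cons] at hd
      by_cases hc : c = ' '
      · simp only [pvTrail, if_pos hc]
        exact ih d hd hne (b + 1)
      · simp only [pvTrail, if_neg hc]
        exact ih d hd hne 0

-- head/last of a stripped string is not whitespace
lemma pvStrip_head (l : List Char) (c : Char) (h : (PySem.Chars.strip l).head? = some c) :
    PySem.Chars.isspace c = false := by
  have hs : PySem.Chars.strip l
      = (List.dropWhile PySem.Chars.isspace (List.dropWhile PySem.Chars.isspace l).reverse).reverse := rfl
  rw [hs] at h
  set m := List.dropWhile PySem.Chars.isspace l with hm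
  set w := List.dropWhile PySem.Chars.isspace m.reverse with hw
  rw [List.head?_reverse] at h
  have hwne : w ≠ [] := by
    intro hnil; rw [hnil] at h; simp at h
  obtain ⟨t, ht⟩ := (List.dropWhile_suffix (l := m.reverse) PySem.Chars.isspace)
  have h2 : m.reverse.getLast? = some c := by
    rw [← ht, List.getLast?_append, h]; rfl
  rw [List.getLast?_reverse] at h2
  have h3 := List.head?_dropWhile_not PySem.Chars.isspace l
  rw [← hm, h2] at h3
  exact h3

lemma pvStrip_last (l : List Char) (c : Char) (h : (PySem.Chars.strip l).getLast? = some c) :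
    PySem.Chars.isspace c = false := by
  have hs : PySem.Chars.strip l
      = (List.dropWhile PySem.Chars.isspace (List.dropWhile PySem.Chars.isspace l).reverse).reverse := rfl
  rw [hs, List.getLast?_reverse] at h
  have h3 := List.head?_dropWhile_not PySem.Chars.isspace (List.dropWhile PySem.Chars.isspace l).reverse
  rw [h] at h3
  exact h3

-- index-shift: from index 1 on, A's loop body never sees x = 0
lemma pvZipShift : ∀ (ts : List Char) (k : Nat) (st : LonSt), 1 ≤ k →
    (ts.zipIdx k).foldl lonStep st = ts.foldl pvStep st := by
  intro ts
  induction ts with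
  | nil => intro k st hk; rfl
  | cons c r ih =>
    intro k st hk
    rw [List.zipIdx_cons, List.foldl_cons, List.foldl_cons]
    have hstep : lonStep st (c, k) = pvStep st c := by
      have hk0 : (k == 0) = false := by simpa using (by omega : k ≠ 0)
      simp [lonStep, pvStep, hk0]
    rw [hstep]
    exact ih (k + 1) (pvStep st c) (by omega)

-- the main invariant of A's loop (from index 1 on)
lemma pvStepA_spec : ∀ (rest : List Char) (longest pre post : Int) (X : PySem.Dict String Int) (cur : String),
    0 ≤ pre → 0 ≤ post → pre + post ≤ longest →
    (rest.foldl pvStep (longest, X.insert cur (pre + post), pre, post, cur)).1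
        = List.foldl max longest ((pvVals ((cur, post) :: pvTok rest pre) (pvTrail rest pre)).map Prod.snd)
    ∧ (rest.foldl pvStep (longest, X.insert cur (pre + post), pre, post, cur)).2.1
        = pvIns (X.insert cur (pre + post)) (pvVals ((cur, post) :: pvTok rest pre) (pvTrail rest pre)) := by
  intro rest
  induction rest with
  | nil =>
    intro longest pre post X cur hpre hpost hle
    simp only [List.foldl_nil, pvTok, pvTrail, pvVals, List.map_cons, List.map_nil,
      List.foldl_cons, List.foldl_nil, pvIns, PySem.Dict.insert_insert_self]
    constructor
    · omega
    · rw [add_comm post pre]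
  | cons c r ih =>
    intro longest pre post X cur hpre hpost hle
    rw [List.foldl_cons]
    by_cases hc : c = ' '
    · -- space step
      have hstep : pvStep (longest, X.insert cur (pre + post), pre, post, cur) c
          = (max longest (pre + 1 + post), (X.insert cur (pre + post)).insert cur (pre + 1 + post),
             pre + 1, post, cur) := by
        subst hc; simp [pvStep, lonStep, pvIfMax]
      rw [hstep, PySem.Dict.insert_insert_self]
      have ih' := ih (max longest (pre + 1 + post)) (pre + 1) post X cur (by omega) hpost
        (le_max_right _ _)
      have htok : pvTok (c :: r) pre = pvTok r (pre + 1) := by simp [pvTok, hc]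
      have htrail : pvTrail (c :: r) pre = pvTrail r (pre + 1) := by simp [pvTrail, hc]
      rw [htok, htrail]
      have hN := pvTok_next_ge r (pre + 1)
      refine ⟨?_, ?_⟩
      · rw [ih'.1, pvVals_cons, List.map_cons, List.foldl_cons, List.foldl_cons]
        congr 1
        generalize pvNext (pvTok r (pre + 1)) (pvTrail r (pre + 1)) = N at hN ⊢
        omega
      · rw [ih'.2, pvVals_cons, pvIns_insert_absorb, pvIns_insert_absorb]
    · -- non-space step
      have hcb : (c == ' ') = false := by simpa using hc
      have hstep : pvStep (longest, X.insert cur (pre + post), pre, post, cur) c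
          = (max longest (max (pre + post) pre),
             (X.insert cur (pre + post)).insert (String.ofList [c]) pre,
             0, pre, String.ofList [c]) := by
        simp [pvStep, lonStep, hc, hcb, pvIfMax, PySem.Dict.insert_insert_self]
        split_ifs <;> omega
      rw [hstep]
      have ih' := ih (max longest (max (pre + post) pre)) 0 pre (X.insert cur (pre + post))
        (String.ofList [c]) le_rfl hpre
        (by rw [zero_add]; exact le_trans (le_max_right (pre + post) pre) (le_max_right longest _))
      rw [zero_add] at ih'
      have htok : pvTok (c :: r) pre = (String.ofList [c], pre) :: pvTok r 0 := by
        simp [pvTok, hc]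
      have htrail : pvTrail (c :: r) pre = pvTrail r 0 := by simp [pvTrail, hc]
      rw [htok, htrail]
      have hN := pvTok_next_ge r 0
      refine ⟨?_, ?_⟩
      · rw [ih'.1,
          pvVals_cons cur post ((String.ofList [c], pre) :: pvTok r 0) (pvTrail r 0),
          pvVals_cons (String.ofList [c]) pre (pvTok r 0) (pvTrail r 0)]
        simp only [pvNext, List.map_cons, List.foldl_cons]
        congr 1
        generalize pvNext (pvTok r 0) (pvTrail r 0) = N at hN ⊢
        omega
      · rw [ih'.2,
          pvVals_cons cur post ((String.ofList [c], pre) :: pvTok r 0) (pvTrail r 0),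
          pvIns_cons, PySem.Dict.insert_insert_self,
          pvVals_cons (String.ofList [c]) pre (pvTok r 0) (pvTrail r 0),
          pvIns_insert_absorb]
        simp only [pvNext]
        rw [add_comm post pre]

-- B's tokenizing pass
lemma pvB1 : ∀ (cs : List Char) (ps : List (String × Int)) (b : Int),
    cs.foldl
      (fun (acc : List (String × Int) × Int) c =>
        if c == ' ' then (acc.1, acc.2 + 1) else (acc.1 ++ [(String.ofList [c], acc.2)], (0 : Int)))
      (ps, b)
    = (ps ++ pvTok cs b, pvTrail cs b) := by
  intro cs
  induction cs with
  | nil => intro ps b; simp [pvTok, pvTrail]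
  | cons c r ih =>
    intro ps b
    rw [List.foldl_cons]
    by_cases hc : c = ' '
    · simp only [hc, beq_self_eq_true, if_pos]
      rw [ih ps (b + 1)]
      simp [pvTok, pvTrail]
    · have hb : (c == ' ') = false := by simpa using hc
      simp only [hb, Bool.false_eq_true, if_false]
      rw [ih (ps ++ [(String.ofList [c], b)]) 0]
      simp [pvTok, pvTrail, if_neg hc, List.append_assoc]

-- B's combining pass
lemma pvB2 : ∀ (ps : List (String × Int)) (t : Int) (obj : PySem.Dict String Int) (m : Int),
    (List.zip ps (ps.tail.map Prod.snd ++ [t])).foldl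
      (fun (acc : PySem.Dict String Int × Int) pa =>
        let val := pa.1.2 + pa.2
        (acc.1.insert pa.1.1 val, if val > acc.2 then val else acc.2))
      (obj, m)
    = (pvIns obj (pvVals ps t), List.foldl max m ((pvVals ps t).map Prod.snd)) := by
  intro ps
  induction ps with
  | nil => intro t obj m; simp [pvVals, pvIns]
  | cons p ps' ih =>
    intro t obj m
    rcases p with ⟨c, b⟩
    have hzip : List.zip ((c, b) :: ps') (((c, b) :: ps').tail.map Prod.snd ++ [t])
        = ((c, b), pvNext ps' t) :: List.zip ps' (ps'.tail.map Prod.snd ++ [t]) := by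
      cases ps' with
      | nil => rfl
      | cons q r => rcases q with ⟨d, b'⟩; rfl
    rw [hzip, List.foldl_cons, pvVals_cons]
    simp only []
    rw [ih t (obj.insert c (b + pvNext ps' t)) (if b + pvNext ps' t > m then b + pvNext ps' t else m)]
    rw [pvIns_cons]
    simp only [List.map_cons, List.foldl_cons, pvIfMax]

-- A's whole accumulation phase, characterized
lemma pvA_main (cs : List Char)
    (hh : ∀ c, cs.head? = some c → c ≠ ' ') (hl : ∀ c, cs.getLast? = some c → c ≠ ' ') :
    (cs.zipIdx.foldl lonStep ((0 : Int), PySem.Dict.empty, (0 : Int), (0 : Int), "")).2.1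
        = pvIns PySem.Dict.empty (pvVals (pvTok cs 0) 0)
    ∧ (cs.zipIdx.foldl lonStep ((0 : Int), PySem.Dict.empty, (0 : Int), (0 : Int), "")).1
        = List.foldl max 0 ((pvVals (pvTok cs 0) 0).map Prod.snd) := by
  cases cs with
  | nil => exact ⟨rfl, rfl⟩
  | cons c0 rest =>
    have h0 : c0 ≠ ' ' := hh c0 rfl
    rw [List.zipIdx_cons, List.foldl_cons]
    have hstep : lonStep ((0 : Int), PySem.Dict.empty, (0 : Int), (0 : Int), "") (c0, 0)
        = ((0 : Int), PySem.Dict.empty.insert (String.ofList [c0]) ((0 : Int) + 0), (0 : Int),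
           (0 : Int), String.ofList [c0]) := by
      simp [lonStep]
    rw [hstep, pvZipShift rest 1 _ le_rfl]
    have hspec := pvStepA_spec rest 0 0 0 PySem.Dict.empty (String.ofList [c0]) le_rfl le_rfl le_rfl
    have htr : pvTrail rest 0 = 0 := by
      cases rest with
      | nil => rfl
      | cons q r' =>
        obtain ⟨d, hd⟩ : ∃ d, (q :: r').getLast? = some d := by
          cases h : (q :: r').getLast? with
          | none => simp [List.getLast?_eq_none_iff] at h
          | some d => exact ⟨d, rfl⟩
        have hcs : (c0 :: q :: r').getLast? = some d := by
          rw [List.getLast?_cons_cons]; exact hd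
        exact pvTrail_zero _ d hd (hl d hcs) 0
    have htok : pvTok (c0 :: rest) 0 = (String.ofList [c0], 0) :: pvTok rest 0 := by
      simp [pvTok, h0]
    rw [htr] at hspec
    constructor
    · rw [hspec.2, htok, pvVals_cons, pvIns_insert_absorb]
    · rw [hspec.1, htok]

-- ===== VERDICT (by name: the statement is the Claim_ definition above) =====
theorem loneliest_spec : Claim_equal_loneliest := by
  unfold Claim_equal_loneliest
  intro s _
  unfold Spec_loneliest loneliest loneliest_alt
  dsimp only
  have hcs : (PySem.Str.strip s).toList = PySem.Chars.strip s.toList := by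
    simp [PySem.Str.strip, String.toList_ofList]
  have hh : ∀ c, (PySem.Str.strip s).toList.head? = some c → c ≠ ' ' := by
    intro c h he
    have hf := pvStrip_head s.toList c (by rw [← hcs]; exact h)
    subst he
    rw [show PySem.Chars.isspace ' ' = true from by decide] at hf
    exact absurd hf (by decide)
  have hl : ∀ c, (PySem.Str.strip s).toList.getLast? = some c → c ≠ ' ' := by
    intro c h he
    have hf := pvStrip_last s.toList c (by rw [← hcs]; exact h)
    subst he
    rw [show PySem.Chars.isspace ' ' = true from by decide] at hf
    exact absurd hf (by decide)
  have hA := pvA_main (PySem.Str.strip s).toList hh hl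
  rw [hA.1, hA.2]
  rw [pvB1 (PySem.Str.strip s).toList [] 0, List.nil_append]
  rw [PySem.List.slice_from_one]
  rw [pvB2 (pvTok (PySem.Str.strip s).toList 0) 0 PySem.Dict.empty 0]
  rw [PySem.List.foldl_append_if]
  simp
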